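-- pv_equiv track=rewrite | github.com/rmkohlman/devopsmaestro | .github/scripts/generate-dashboard.py | chart_sprint_velocity
-- ===== SOURCE A (Python) =====
-- from collections import Counter, defaultdict
--
-- def _status(item: dict) -> str:
--     return item.get("status") or "None"
--
-- def _sprint(item: dict) -> str | None:
--     return item.get("sprint") or None
--
-- def chart_sprint_velocity(items: list[dict]) -> str:
--     """Completed items per sprint (Done status only)."""
--     done_by_sprint: dict[str, int] = defaultdict(int)
--     hotfixes = 0
--
--     for item in items:
--         if _status(item) != "Done":
--             continue
--         sprint = _sprint(item)
--         if sprint: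
--             done_by_sprint[sprint] += 1
--         else:
--             hotfixes += 1
--
--     # Sort sprints naturally
--     sprint_names = sorted(done_by_sprint.keys())
--     labels = sprint_names + (["Hotfixes (no sprint)"] if hotfixes else [])
--     values = [done_by_sprint[s] for s in sprint_names] + ([hotfixes] if hotfixes else [])
--
--     if not values:
--         return "<!-- No completed sprint data -->"
--
--     max_val = max(values) if values else 10
--     y_max = max_val + 5
--
--     label_str = ", ".join(f'"{l}"' for l in labels)
--     value_str = ", ".join(str(v) for v in values)
--
--     lines = [
--         "```mermaid",
--         "xychart-beta",
--         '    title "Items Completed per Sprint"',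
--         f'    x-axis [{label_str}]',
--         f'    y-axis "Items Completed" 0 --> {y_max}',
--         f'    bar [{value_str}]',
--         "```",
--     ]
--     return "\n".join(lines)
-- ===== SOURCE B (Python) =====
-- from itertools import groupby
--
--
-- def _status(item: dict) -> str:
--     return item.get("status") or "None"
--
--
-- def _sprint(item: dict):
--     return item.get("sprint") or None
--
--
-- def chart_sprint_velocity(items: list) -> str:
--     """Completed items per sprint (Done status only) — grouped pass over sorted sprints."""
--     done = [_sprint(it) for it in items if _status(it) == "Done"]
--     hotfixes = sum(1 for s in done if s is None)
--     sprints = sorted(s for s in done if s is not None)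
--
--     labels = []
--     values = []
--     for k, g in groupby(sprints):
--         labels.append(k)
--         values.append(sum(1 for _ in g))
--     if hotfixes:
--         labels.append("Hotfixes (no sprint)")
--         values.append(hotfixes)
--
--     if not values:
--         return "<!-- No completed sprint data -->"
--
--     y_max = max(values) + 5
--     label_str = ", ".join(f'"{l}"' for l in labels)
--     value_str = ", ".join(str(v) for v in values)
--     lines = [
--         "```mermaid",
--         "xychart-beta",
--         '    title "Items Completed per Sprint"',
--         f'    x-axis [{label_str}]',
--         f'    y-axis "Items Completed" 0 --> {y_max}',
--         f'    bar [{value_str}]',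
--         "```",
--     ]
--     return "\n".join(lines)
-- ===== Notes on version B (the rewrite author's own statement) =====
-- stated objective: alternative
-- what changed: Replaces A's defaultdict increment loop plus key sort with filtering the Done sprints, sorting the occurrence list once, and emitting (sprint, count) pairs in one itertools.groupby run-length pass.
import Mathlib
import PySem

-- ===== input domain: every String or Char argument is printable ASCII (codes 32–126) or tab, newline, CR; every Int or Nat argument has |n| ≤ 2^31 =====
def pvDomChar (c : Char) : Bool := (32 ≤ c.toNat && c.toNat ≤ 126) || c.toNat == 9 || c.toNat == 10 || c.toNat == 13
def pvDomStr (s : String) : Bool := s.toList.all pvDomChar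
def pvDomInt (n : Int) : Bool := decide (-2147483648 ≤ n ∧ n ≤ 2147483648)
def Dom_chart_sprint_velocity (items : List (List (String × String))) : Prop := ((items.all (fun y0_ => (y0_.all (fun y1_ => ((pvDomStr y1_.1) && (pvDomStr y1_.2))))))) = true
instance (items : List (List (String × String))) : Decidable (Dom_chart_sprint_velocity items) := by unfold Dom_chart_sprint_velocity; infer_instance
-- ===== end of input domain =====

-- B replaces A's defaultdict-increment loop + key sort by a sort of the Done sprint occurrences followed by one grouped run-length pass (itertools.groupby); alternative decomposition, same cost.

-- ===== PORT A =====
-- shared helpers: Python module functions _status / _sprint ('x or y' falsy coercion made explicit)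
def pyDictGet (item : List (String × String)) (k : String) : Option String :=
  (item.find? (fun p => p.1 == k)).map (·.2)

def statusOf (item : List (String × String)) : String :=
  match pyDictGet item "status" with
  | some s => if s = "" then "None" else s
  | none => "None"

def sprintOf (item : List (String × String)) : Option String :=
  match pyDictGet item "sprint" with
  | some s => if s = "" then none else some s
  | none => none

def chart_sprint_velocity (items : List (List (String × String))) : String :=
  let st := items.foldl (fun (acc : PySem.Dict String Int × Int) item =>
      if statusOf item ≠ "Done" then acc
      else match sprintOf item with
        | some s => (acc.1.modify s 0 (· + 1), acc.2)
        | none => (acc.1, acc.2 + 1)) (PySem.Dict.empty, 0)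
  let done_by_sprint := st.1
  let hotfixes := st.2
  let sprint_names := PySem.List.sorted done_by_sprint.keys id
  let labels := sprint_names ++ (if hotfixes ≠ 0 then ["Hotfixes (no sprint)"] else [])
  let values := sprint_names.map (fun s => done_by_sprint.getD s 0) ++ (if hotfixes ≠ 0 then [hotfixes] else [])
  if values = [] then "<!-- No completed sprint data -->"
  else
    let max_val := match PySem.List.max? values id with | some m => m | none => 10
    let y_max := max_val + 5
    let label_str := PySem.Str.join ", " (labels.map (fun l => "\"" ++ l ++ "\""))
    let value_str := PySem.Str.join ", " (values.map (fun v => PySem.Int.toStr v))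
    PySem.Str.join "\n" ["```mermaid", "xychart-beta", "    title \"Items Completed per Sprint\"",
      "    x-axis [" ++ label_str ++ "]",
      "    y-axis \"Items Completed\" 0 --> " ++ PySem.Int.toStr y_max,
      "    bar [" ++ value_str ++ "]", "```"]

-- ===== PORT B =====
-- itertools.groupby over a sorted list: each run yields (key, run length)
def groupRuns : List String → List (String × Int)
  | [] => []
  | x :: xs => (x, 1 + ((xs.takeWhile (· == x)).length : Int)) :: groupRuns (xs.dropWhile (· == x))
termination_by l => l.length
decreasing_by
  simp only [List.length_cons]
  exact Nat.lt_succ_of_le (List.length_dropWhile_le _ _)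

def chart_sprint_velocity_alt (items : List (List (String × String))) : String :=
  let done := items.filterMap (fun it => if statusOf it = "Done" then some (sprintOf it) else none)
  let hotfixes : Int := (done.countP (·.isNone) : Nat)
  let sprints := PySem.List.sorted (done.filterMap id) id
  let groups := groupRuns sprints
  let labels := groups.map (·.1) ++ (if hotfixes ≠ 0 then ["Hotfixes (no sprint)"] else [])
  let values := groups.map (·.2) ++ (if hotfixes ≠ 0 then [hotfixes] else [])
  if values = [] then "<!-- No completed sprint data -->"
  else
    -- values is nonempty here, so max() cannot raise; the none branch is unreachable
    let y_max := (match PySem.List.max? values id with | some m => m | none => 0) + 5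
    let label_str := PySem.Str.join ", " (labels.map (fun l => "\"" ++ l ++ "\""))
    let value_str := PySem.Str.join ", " (values.map (fun v => PySem.Int.toStr v))
    PySem.Str.join "\n" ["```mermaid", "xychart-beta", "    title \"Items Completed per Sprint\"",
      "    x-axis [" ++ label_str ++ "]",
      "    y-axis \"Items Completed\" 0 --> " ++ PySem.Int.toStr y_max,
      "    bar [" ++ value_str ++ "]", "```"]

-- ===== PRECONDITION & SPEC =====
def Spec_chart_sprint_velocity (items : List (List (String × String))) (out : String) : Prop := out = chart_sprint_velocity_alt items
instance (items : List (List (String × String))) (out : String) : Decidable (Spec_chart_sprint_velocity items out) := by unfold Spec_chart_sprint_velocity; infer_instance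

-- ===== CLAIM (what is proved, stated in full; the proofs are below) =====
def Claim_equal_chart_sprint_velocity : Prop := ∀ (items : List (List (String × String))), Dom_chart_sprint_velocity items → Spec_chart_sprint_velocity items (chart_sprint_velocity items)

-- ===== LEMMAS AND PROOFS =====

-- the multiset of sprint names of Done items, and the count of Done items without a sprint
def spOf (items : List (List (String × String))) : List String :=
  items.filterMap (fun it => if statusOf it = "Done" then sprintOf it else none)

def hotOf (items : List (List (String × String))) : Nat :=
  items.countP (fun it => statusOf it == "Done" && (sprintOf it).isNone)

lemma foldA_eq (items : List (List (String × String))) (d : PySem.Dict String Int) (h : Int) :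
    items.foldl (fun (acc : PySem.Dict String Int × Int) item =>
      if statusOf item ≠ "Done" then acc
      else match sprintOf item with
        | some s => (acc.1.modify s 0 (· + 1), acc.2)
        | none => (acc.1, acc.2 + 1)) (d, h)
    = ((spOf items).foldl (fun d x => d.modify x 0 (· + 1)) d, h + (hotOf items : Int)) := by
  induction items generalizing d h with
  | nil => simp [spOf, hotOf]
  | cons it items ih =>
    by_cases hst : statusOf it = "Done"
    · cases hsp : sprintOf it with
      | some s =>
        have h1 : spOf (it :: items) = s :: spOf items := by simp [spOf, hst, hsp]
        have h2 : (hotOf (it :: items) : Int) = (hotOf items : Int) := by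
          simp [hotOf, hst, hsp]
        rw [List.foldl_cons]
        simp only [hst, hsp, ne_eq, not_true_eq_false, if_false]
        rw [ih, h1, h2, List.foldl_cons]
      | none =>
        have h1 : spOf (it :: items) = spOf items := by simp [spOf, hst, hsp]
        have h2 : (hotOf (it :: items) : Int) = (hotOf items : Int) + 1 := by
          simp [hotOf, hst, hsp]
        rw [List.foldl_cons]
        simp only [hst, hsp, ne_eq, not_true_eq_false, if_false]
        rw [ih, h1, h2]
        simp only [Prod.mk.injEq]
        exact ⟨by trivial, by omega⟩
    · have h1 : spOf (it :: items) = spOf items := by simp [spOf, hst]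
      have h2 : (hotOf (it :: items) : Int) = (hotOf items : Int) := by
        simp [hotOf, hst]
      rw [List.foldl_cons]
      simp only [hst, ne_eq, not_false_eq_true, if_true]
      rw [ih, h1, h2]

lemma done_filterMap (items : List (List (String × String))) :
    (items.filterMap (fun it => if statusOf it = "Done" then some (sprintOf it) else none)).filterMap id
    = spOf items := by
  rw [List.filterMap_filterMap, spOf]
  apply List.filterMap_congr
  intro it _
  by_cases hst : statusOf it = "Done" <;> simp [hst]

lemma done_countP (items : List (List (String × String))) :
    (items.filterMap (fun it => if statusOf it = "Done" then some (sprintOf it) else none)).countP (·.isNone)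
    = hotOf items := by
  rw [List.countP_filterMap, hotOf]
  apply List.countP_congr
  intro it _
  by_cases hst : statusOf it = "Done" <;> simp [hst]

lemma mem_fst_groupRuns (l : List String) (k : String) :
    k ∈ (groupRuns l).map Prod.fst ↔ k ∈ l := by
  induction l using groupRuns.induct with
  | case1 => simp [groupRuns]
  | case2 x xs ih =>
    rw [groupRuns]
    simp only [List.map_cons, List.mem_cons, ih]
    constructor
    · rintro (rfl | hk)
      · exact Or.inl rfl
      · exact Or.inr ((List.dropWhile_sublist _).mem hk)
    · rintro (rfl | hk)
      · exact Or.inl rfl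
      · rw [← List.takeWhile_append_dropWhile (p := (· == x)) (l := xs), List.mem_append] at hk
        rcases hk with hk | hk
        · exact Or.inl (by simpa using List.mem_takeWhile_imp hk)
        · exact Or.inr hk

lemma gt_of_mem_dropWhile (x : String) (xs : List String)
    (hall : ∀ y ∈ xs, x ≤ y) (hp : xs.Pairwise (· ≤ ·)) :
    ∀ y ∈ xs.dropWhile (· == x), x < y := by
  induction xs with
  | nil => simp
  | cons z zs ih =>
    by_cases hz : (z == x) = true
    · simp only [List.dropWhile_cons]
      rw [if_pos hz]
      exact ih (fun y hy => hall y (List.mem_cons_of_mem _ hy)) hp.tail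
    · simp only [List.dropWhile_cons]
      rw [if_neg hz]
      intro y hy
      have hxz : x < z := lt_of_le_of_ne (hall z List.mem_cons_self) (fun h => hz (by simp [h]))
      rcases List.mem_cons.1 hy with rfl | hy
      · exact hxz
      · exact lt_of_lt_of_le hxz (List.rel_of_pairwise_cons hp hy)

lemma pairwise_fst_groupRuns (l : List String) (hp : l.Pairwise (· ≤ ·)) :
    ((groupRuns l).map Prod.fst).Pairwise (· < ·) := by
  induction l using groupRuns.induct with
  | case1 => simp [groupRuns]
  | case2 x xs ih =>
    rw [groupRuns]
    simp only [List.map_cons, List.pairwise_cons]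
    refine ⟨?_, ih (List.Pairwise.sublist (List.dropWhile_sublist _) hp.tail)⟩
    intro k hk
    rw [mem_fst_groupRuns] at hk
    exact gt_of_mem_dropWhile x xs (fun y hy => List.rel_of_pairwise_cons hp hy) hp.tail k hk

lemma groupRuns_counts (l : List String) (hp : l.Pairwise (· ≤ ·)) :
    groupRuns l = ((groupRuns l).map Prod.fst).map (fun k => (k, (l.count k : Int))) := by
  induction l using groupRuns.induct with
  | case1 => simp [groupRuns]
  | case2 x xs ih =>
    have hall : ∀ y ∈ xs, x ≤ y := fun y hy => List.rel_of_pairwise_cons hp hy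
    have hgt := gt_of_mem_dropWhile x xs hall hp.tail
    rw [groupRuns]
    simp only [List.map_cons, List.map_map]
    congr 1
    · -- head: run length = count of x in x :: xs
      simp only [Prod.mk.injEq, true_and]
      have hct : (xs.takeWhile (· == x)).count x = (xs.takeWhile (· == x)).length :=
        List.count_eq_length.2 (fun b hb => ((beq_iff_eq).1 (List.mem_takeWhile_imp (p := (· == x)) hb)).symm)
      have hcd : (xs.dropWhile (· == x)).count x = 0 :=
        List.count_eq_zero.2 (fun hmem => lt_irrefl x (hgt x hmem))
      have hcnt : xs.count x = (xs.takeWhile (· == x)).length := by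
        conv_lhs => rw [← List.takeWhile_append_dropWhile (p := (· == x)) (l := xs)]
        rw [List.count_append, hct, hcd, Nat.add_zero]
      rw [List.count_cons_self, hcnt]
      push_cast
      ring
    · -- tail
      conv_lhs => rw [ih (List.Pairwise.sublist (List.dropWhile_sublist _) hp.tail)]
      rw [List.map_map]
      apply List.map_congr_left
      intro p hp'
      simp only [Function.comp_apply]
      set k := p.1 with hkdef
      have hk : k ∈ (groupRuns (xs.dropWhile (· == x))).map Prod.fst :=
        List.mem_map_of_mem hp'
      have hkmem : k ∈ xs.dropWhile (· == x) := (mem_fst_groupRuns _ _).1 hk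
      have hkx : x < k := hgt k hkmem
      have hne : k ≠ x := ne_of_gt hkx
      have hctk : (xs.takeWhile (· == x)).count k = 0 :=
        List.count_eq_zero.2 (fun hmem => hne ((beq_iff_eq).1 (List.mem_takeWhile_imp (p := (· == x)) hmem)))
      have h0 : xs.count k = (xs.dropWhile (· == x)).count k := by
        conv_lhs => rw [← List.takeWhile_append_dropWhile (p := (· == x)) (l := xs)]
        rw [List.count_append, hctk, Nat.zero_add]
      have hxk : ¬ x = k := fun h => hne h.symm
      have hcnt : (x :: xs).count k = (xs.dropWhile (· == x)).count k := by
        simp [h0, hxk]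
      rw [hcnt]

lemma max?_cons_some (a : Int) (xs : List Int) :
    ∃ m, PySem.List.max? (a :: xs) id = some m := by
  show ∃ m, List.foldl _ (some a) xs = some m
  induction xs generalizing a with
  | nil => exact ⟨a, rfl⟩
  | cons y ys ih =>
    simp only [List.foldl_cons]
    split <;> exact ih _

-- the central fact: A's (sorted distinct keys, dict counts) = B's grouped runs of the sorted multiset
lemma grouped_eq (sp : List String) :
    groupRuns (PySem.List.sorted sp id)
      = (PySem.List.sorted (PySem.Set.ofList sp : List String) id).map
          (fun k => (k, (sp.count k : Int))) := by
  set ls := PySem.List.sorted sp id with hls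
  have hpw : ls.Pairwise (· ≤ ·) := PySem.List.sorted_pairwise sp id
  have hperm : ls.Perm sp := PySem.List.sorted_perm sp id false
  have hkeys : PySem.List.sorted (PySem.Set.ofList sp : List String) id
      = (groupRuns ls).map Prod.fst := by
    apply PySem.List.sorted_eq_of_perm_of_pairwise_lt
    · rw [List.perm_ext_iff_of_nodup
        (List.Pairwise.imp (fun h => ne_of_lt h) (pairwise_fst_groupRuns ls hpw))
        (PySem.Set.nodup_ofList sp)]
      intro k
      rw [mem_fst_groupRuns, PySem.Set.mem_ofList, hperm.mem_iff]
    · exact pairwise_fst_groupRuns ls hpw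
  rw [hkeys]
  conv_lhs => rw [groupRuns_counts ls hpw]
  apply List.map_congr_left
  intro k _
  simp only [Prod.mk.injEq, true_and]
  rw [hperm.count_eq]

-- ===== VERDICT (by name: the statement is the Claim_ definition above) =====
theorem chart_sprint_velocity_spec : Claim_equal_chart_sprint_velocity := by
  intro items _
  unfold Spec_chart_sprint_velocity
  simp only [chart_sprint_velocity, chart_sprint_velocity_alt]
  rw [foldA_eq, done_filterMap, done_countP]
  dsimp only
  set sp := spOf items with hsp
  -- dict facts
  set d := sp.foldl (fun d x => d.modify x 0 (· + 1)) (PySem.Dict.empty : PySem.Dict String Int) with hd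
  have hkeys : d.keys = (PySem.Set.ofList sp : List String) := by
    rw [hd]
    exact PySem.Dict.keys_foldl_modify sp 0 (fun _ _ => (· + 1)) PySem.Dict.empty
  have hgetD : ∀ k, d.getD k 0 = (sp.count k : Int) := by
    intro k
    rw [hd]
    simpa using PySem.Dict.getD_foldl_modify_add_one sp PySem.Dict.empty k
  -- labels and values coincide
  have hlv : (PySem.List.sorted d.keys id).map (fun s => d.getD s 0)
      = (groupRuns (PySem.List.sorted sp id)).map (·.2) := by
    rw [hkeys, grouped_eq]
    simp only [List.map_map]
    apply List.map_congr_left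
    intro k _
    exact hgetD k
  have hlab : PySem.List.sorted d.keys id = (groupRuns (PySem.List.sorted sp id)).map (·.1) := by
    rw [hkeys, grouped_eq, List.map_map]
    simp [Function.comp_def]
  rw [hlv, hlab]
  simp only [zero_add]
  -- same labels, values, hotfixes: remaining difference is only the unreachable max() default
  set vs := (groupRuns (PySem.List.sorted sp id)).map (·.2)
      ++ (if (hotOf items : Int) ≠ 0 then [(hotOf items : Int)] else []) with hvs
  by_cases hempty : vs = []
  · simp [hempty]
  · simp only [if_neg hempty]
    obtain ⟨a, xs, hax⟩ := List.exists_cons_of_ne_nil hempty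
    obtain ⟨m, hm⟩ := max?_cons_some a xs
    rw [hax, hm]
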